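-- pv_equiv track=rewrite | github.com/EyeSeeTea/security-tests | scripts/update_google_sheet_from_csv.py | count_unresolved_by_severity
-- ===== SOURCE A (Python) =====
-- from typing import Dict, List, Optional, Tuple
--
-- def find_column_index(header: List[str], column_name: str) -> Optional[int]:
--     target = column_name.strip().lower()
--     for idx, value in enumerate(header):
--         if str(value).strip().lower() == target:
--             return idx
--     return None
--
-- def count_unresolved_by_severity(
--     sheet_values: List[List[str]],
--     applicable_column: str,
--     severity_column: str,
--     selected_severities: List[str],
-- ) -> Dict[str, int]:
--     if not sheet_values:
--         return {severity: 0 for severity in selected_severities}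
--
--     header = sheet_values[0]
--     applicable_idx = find_column_index(header, applicable_column)
--     severity_idx = find_column_index(header, severity_column)
--
--     if applicable_idx is None:
--         raise SystemExit(
--             f"Column '{applicable_column}' does not exist in sheet header: {header}"
--         )
--     if severity_idx is None:
--         raise SystemExit(
--             f"Column '{severity_column}' does not exist in sheet header: {header}"
--         )
--
--     counts: Dict[str, int] = {severity: 0 for severity in selected_severities}
--     for row in sheet_values[1:]:
--         applicable_value = ""
--         if len(row) > applicable_idx:
--             applicable_value = str(row[applicable_idx]).strip()
--         if applicable_value:
--             continue
--
--         severity_value = "unknown"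
--         if len(row) > severity_idx:
--             severity_value = str(row[severity_idx]).strip().lower() or "unknown"
--
--         if severity_value in counts:
--             counts[severity_value] += 1
--
--     return counts
-- ===== SOURCE B (Python) =====
-- from typing import Dict, List, Optional
--
-- def find_column_index(header: List[str], column_name: str) -> Optional[int]:
--     target = column_name.strip().lower()
--     for idx, value in enumerate(header):
--         if str(value).strip().lower() == target:
--             return idx
--     return None
--
-- def count_unresolved_by_severity(
--     sheet_values: List[List[str]],
--     applicable_column: str,
--     severity_column: str,
--     selected_severities: List[str],
-- ) -> Dict[str, int]:
--     if not sheet_values: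
--         return {severity: 0 for severity in selected_severities}
--
--     header = sheet_values[0]
--     applicable_idx = find_column_index(header, applicable_column)
--     severity_idx = find_column_index(header, severity_column)
--
--     if applicable_idx is None:
--         raise SystemExit(
--             f"Column '{applicable_column}' does not exist in sheet header: {header}"
--         )
--     if severity_idx is None:
--         raise SystemExit(
--             f"Column '{severity_column}' does not exist in sheet header: {header}"
--         )
--
--     # Phase 1: normalized severity of every unresolved row.
--     unresolved = [
--         (str(row[severity_idx]).strip().lower() if len(row) > severity_idx else "")
--         or "unknown"
--         for row in sheet_values[1:]
--         if not (str(row[applicable_idx]).strip() if len(row) > applicable_idx else "")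
--     ]
--
--     # Phase 2: sort, then one run-length scan builds the full frequency table.
--     unresolved.sort()
--     tally: Dict[str, int] = {}
--     i = 0
--     n = len(unresolved)
--     while i < n:
--         j = i
--         while j < n and unresolved[j] == unresolved[i]:
--             j += 1
--         tally[unresolved[i]] = j - i
--         i = j
--
--     # Phase 3: project the table onto the requested severities.
--     return {severity: tally.get(severity, 0) for severity in selected_severities}
-- ===== Notes on version B (the rewrite author's own statement) =====
-- stated objective: alternative
-- what changed: Replaces A's single pass that increments only already-present dict keys with a three-phase sort-and-group algorithm: collect every unresolved row's normalized severity, sort the list and build the full frequency table by one run-length scan over equal runs, then project that table onto the requested severities.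
import Mathlib
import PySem

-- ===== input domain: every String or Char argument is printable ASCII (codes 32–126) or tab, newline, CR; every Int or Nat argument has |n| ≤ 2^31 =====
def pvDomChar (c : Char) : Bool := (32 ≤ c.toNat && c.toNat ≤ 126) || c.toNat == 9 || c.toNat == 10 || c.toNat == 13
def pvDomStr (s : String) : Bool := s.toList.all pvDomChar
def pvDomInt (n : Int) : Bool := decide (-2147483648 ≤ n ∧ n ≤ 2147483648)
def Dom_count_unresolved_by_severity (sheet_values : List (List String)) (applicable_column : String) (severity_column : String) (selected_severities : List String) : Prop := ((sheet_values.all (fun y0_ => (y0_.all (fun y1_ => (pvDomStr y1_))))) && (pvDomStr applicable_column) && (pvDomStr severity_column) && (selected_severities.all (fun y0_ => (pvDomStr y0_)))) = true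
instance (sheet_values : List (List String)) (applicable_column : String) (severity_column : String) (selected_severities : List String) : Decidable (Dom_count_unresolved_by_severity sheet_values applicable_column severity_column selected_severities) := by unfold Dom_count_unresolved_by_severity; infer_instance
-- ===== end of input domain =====

-- B replaces A's in-place increment of the selected keys by a sort-and-group frequency
-- table (sort the unresolved severities, run-length scan, project); objective: alternative.

-- ===== PORT A =====
-- find_column_index, shared verbatim by both Python sources
def findColIdx (header : List String) (target : List Char) (idx : Nat) : Option Nat :=
  match header with
  | [] => none
  | v :: rest =>
      if PySem.Chars.lower (PySem.Chars.strip v.toList) = target then some idx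
      else findColIdx rest target (idx + 1)

-- applicable cell of a row, stripped ('' when the row is too short), as chars
def pvAppChars (aIdx : Nat) (row : List String) : List Char :=
  if aIdx < row.length then PySem.Chars.strip (row.getD aIdx "").toList else []

-- normalized severity of a row (strip+lower, 'unknown' fallback)
def pvSev (sIdx : Nat) (row : List String) : String :=
  if sIdx < row.length then
    let v := PySem.Chars.lower (PySem.Chars.strip (row.getD sIdx "").toList)
    if v = [] then "unknown" else String.ofList v
  else "unknown"

def count_unresolved_by_severity (sheet_values : List (List String)) (applicable_column : String) (severity_column : String) (selected_severities : List String) : List (String × Int) :=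
  match sheet_values with
  | [] => (selected_severities.foldl (fun d s => d.insert s (0 : Int)) PySem.Dict.empty).items
  | header :: rows =>
    match findColIdx header (PySem.Chars.lower (PySem.Chars.strip applicable_column.toList)) 0,
          findColIdx header (PySem.Chars.lower (PySem.Chars.strip severity_column.toList)) 0 with
    | some aIdx, some sIdx =>
        let d0 : PySem.Dict String Int :=
          selected_severities.foldl (fun d s => d.insert s (0 : Int)) PySem.Dict.empty
        (rows.foldl (fun d row =>
            if pvAppChars aIdx row ≠ [] then d
            else
              let sev := pvSev sIdx row
              if d.contains sev then d.insert sev (d.getD sev 0 + 1) else d) d0).items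
    | _, _ => []  -- SystemExit in Python: excluded by Pre_

-- ===== PORT B =====
-- B's own copies of find_column_index and the cell extractors (same verbatim Python helpers)
def findColIdxB (header : List String) (target : List Char) (idx : Nat) : Option Nat :=
  match header with
  | [] => none
  | v :: rest =>
      if PySem.Chars.lower (PySem.Chars.strip v.toList) = target then some idx
      else findColIdxB rest target (idx + 1)

def pvAppCharsB (aIdx : Nat) (row : List String) : List Char :=
  if aIdx < row.length then PySem.Chars.strip (row.getD aIdx "").toList else []

def pvSevB (sIdx : Nat) (row : List String) : String :=
  if sIdx < row.length then
    let v := PySem.Chars.lower (PySem.Chars.strip (row.getD sIdx "").toList)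
    if v = [] then "unknown" else String.ofList v
  else "unknown"

-- B's run-length scan over the sorted list: each outer while-iteration consumes one
-- run of equal elements (takeWhile = the inner j-scan) and records its length
def runLenTally : List String → PySem.Dict String Int → PySem.Dict String Int
  | [], d => d
  | x :: t, d =>
      runLenTally (t.dropWhile (· == x)) (d.insert x (((t.takeWhile (· == x)).length + 1 : Nat) : Int))
termination_by M _ => M.length
decreasing_by
  simp only [List.length_cons]
  exact Nat.lt_succ_of_le (List.length_dropWhile_le _ _)

def count_unresolved_by_severity_alt (sheet_values : List (List String)) (applicable_column : String) (severity_column : String) (selected_severities : List String) : List (String × Int) :=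
  if sheet_values.isEmpty then
    (selected_severities.foldl (fun d s => d.insert s (0 : Int)) PySem.Dict.empty).items
  else
    let header := sheet_values.headD []
    let rows := sheet_values.tail
    match findColIdxB header (PySem.Chars.lower (PySem.Chars.strip applicable_column.toList)) 0 with
    | none => []  -- SystemExit in Python: excluded by Pre_
    | some aIdx =>
      match findColIdxB header (PySem.Chars.lower (PySem.Chars.strip severity_column.toList)) 0 with
      | none => []  -- SystemExit in Python: excluded by Pre_
      | some sIdx =>
        let unresolved : List String :=
          (rows.filter (fun row => decide (pvAppCharsB aIdx row = []))).map (pvSevB sIdx)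
        let tally : PySem.Dict String Int :=
          runLenTally (PySem.List.sorted unresolved (fun x => x) false) PySem.Dict.empty
        (selected_severities.foldl
            (fun d s => d.insert s (tally.getD s 0)) PySem.Dict.empty).items

-- ===== PRECONDITION & SPEC =====
-- Pre_ excludes exactly the inputs where Python raises SystemExit: a nonempty sheet whose
-- header contains no cell matching (after strip+lower) the applicable or severity column name.
def Pre_count_unresolved_by_severity (sheet_values : List (List String)) (applicable_column : String) (severity_column : String) (selected_severities : List String) : Prop :=
  sheet_values = [] ∨
    (((sheet_values.headD []).any (fun v => PySem.Chars.lower (PySem.Chars.strip v.toList) = PySem.Chars.lower (PySem.Chars.strip applicable_column.toList))) = true ∧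
     ((sheet_values.headD []).any (fun v => PySem.Chars.lower (PySem.Chars.strip v.toList) = PySem.Chars.lower (PySem.Chars.strip severity_column.toList))) = true)
instance (sheet_values : List (List String)) (applicable_column : String) (severity_column : String) (selected_severities : List String) : Decidable (Pre_count_unresolved_by_severity sheet_values applicable_column severity_column selected_severities) := by unfold Pre_count_unresolved_by_severity; infer_instance

def pvWitness_count_unresolved_by_severity : List (List String) × String × String × List String :=
  ([["Applicable", "Severity"], ["", "High"], ["yes", "low"]], "applicable", "severity", ["high", "unknown"])

def Spec_count_unresolved_by_severity (sheet_values : List (List String)) (applicable_column : String) (severity_column : String) (selected_severities : List String) (out : List (String × Int)) : Prop := out = count_unresolved_by_severity_alt sheet_values applicable_column severity_column selected_severities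
instance (sheet_values : List (List String)) (applicable_column : String) (severity_column : String) (selected_severities : List String) (out : List (String × Int)) : Decidable (Spec_count_unresolved_by_severity sheet_values applicable_column severity_column selected_severities out) := by unfold Spec_count_unresolved_by_severity; infer_instance

-- ===== CLAIM (what is proved, stated in full; the proofs are below) =====
def Claim_equal_count_unresolved_by_severity : Prop := ∀ (sheet_values : List (List String)) (applicable_column : String) (severity_column : String) (selected_severities : List String), Dom_count_unresolved_by_severity sheet_values applicable_column severity_column selected_severities → Pre_count_unresolved_by_severity sheet_values applicable_column severity_column selected_severities → Spec_count_unresolved_by_severity sheet_values applicable_column severity_column selected_severities (count_unresolved_by_severity sheet_values applicable_column severity_column selected_severities)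

-- ===== LEMMAS AND PROOFS =====

-- findColIdx finds an index exactly when some header cell matches the target
lemma findColIdx_isSome (header : List String) (target : List Char) (i : Nat) :
    (findColIdx header target i).isSome =
      header.any (fun v => decide (PySem.Chars.lower (PySem.Chars.strip v.toList) = target)) := by
  induction header generalizing i with
  | nil => simp [findColIdx]
  | cons v rest ih =>
      by_cases h : PySem.Chars.lower (PySem.Chars.strip v.toList) = target <;>
        simp [findColIdx, h, ih]

-- B's verbatim helper copies coincide with A's
lemma findColIdxB_eq (header : List String) (target : List Char) (i : Nat) :
    findColIdxB header target i = findColIdx header target i := by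
  induction header generalizing i with
  | nil => rfl
  | cons v rest ih => simp only [findColIdxB, findColIdx, ih]

lemma pvAppCharsB_eq : pvAppCharsB = pvAppChars := rfl

lemma pvSevB_eq : pvSevB = pvSev := rfl

-- A's row loop equals the severity loop over the filtered, normalized rows
lemma foldA_filter (aIdx sIdx : Nat) (rows : List (List String)) (d : PySem.Dict String Int) :
    rows.foldl (fun d row =>
        if pvAppChars aIdx row ≠ [] then d
        else
          let sev := pvSev sIdx row
          if d.contains sev then d.insert sev (d.getD sev 0 + 1) else d) d =
    ((rows.filter (fun row => decide (pvAppChars aIdx row = []))).map (pvSev sIdx)).foldl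
        (fun d sev => if d.contains sev then d.insert sev (d.getD sev 0 + 1) else d) d := by
  induction rows generalizing d with
  | nil => rfl
  | cons r t ih =>
      rw [List.foldl_cons, List.filter_cons]
      by_cases h : pvAppChars aIdx r = []
      ·  rw [if_neg (by simp [h] : ¬ pvAppChars aIdx r ≠ []),
             if_pos (by simp [h] : decide (pvAppChars aIdx r = []) = true),
             List.map_cons, List.foldl_cons]
         exact ih _
      ·  rw [if_pos h, if_neg (by simp [h] : ¬ decide (pvAppChars aIdx r = []) = true)]
         exact ih d

-- A's counting loop: keys are preserved and each contained key gains the count of its occurrences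
lemma loopA_spec (L : List String) (d : PySem.Dict String Int) (hnd : d.keys.Nodup) :
    (L.foldl (fun d sev => if d.contains sev then d.insert sev (d.getD sev 0 + 1) else d) d).keys = d.keys ∧
    ∀ v, (L.foldl (fun d sev => if d.contains sev then d.insert sev (d.getD sev 0 + 1) else d) d).getD v 0 =
      d.getD v 0 + (if d.contains v = true then (L.count v : Int) else 0) := by
  induction L generalizing d with
  | nil => simp
  | cons x t ih =>
      by_cases hc : d.contains x = true
      · have hkeys : (d.insert x (d.getD x 0 + 1)).keys = d.keys :=
          PySem.Dict.keys_insert_of_contains d _ hc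
        have hnd' : (d.insert x (d.getD x 0 + 1)).keys.Nodup := by rw [hkeys]; exact hnd
        obtain ⟨ihk, ihv⟩ := ih (d.insert x (d.getD x 0 + 1)) hnd'
        have hcont : ∀ v, (d.insert x (d.getD x 0 + 1)).contains v = d.contains v := by
          intro v
          rw [PySem.Dict.contains_eq_decide_mem_keys, PySem.Dict.contains_eq_decide_mem_keys, hkeys]
        constructor
        · simp only [List.foldl_cons, hc, if_true, ihk, hkeys]
        · intro v
          simp only [List.foldl_cons, hc, if_true, ihv, hcont,
            PySem.Dict.getD_insert, List.count_cons]
          by_cases hvx : v = x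
          · subst hvx; simp [hc]; ring
          · have : (x == v) = false := by simp; exact fun h => hvx h.symm
            simp [hvx, this]
      · obtain ⟨ihk, ihv⟩ := ih d hnd
        have hc' : d.contains x = false := by simpa using hc
        constructor
        · simp only [List.foldl_cons, hc', if_false, Bool.false_eq_true, ihk]
        · intro v
          simp only [List.foldl_cons, hc', Bool.false_eq_true, if_false, ihv, List.count_cons]
          by_cases hcv : d.contains v = true
          · have hvx : ¬ (x == v) = true := by
              simp only [beq_iff_eq]
              intro h; subst h; rw [hcv] at hc'; cases hc'
            simp [hcv, hvx]
          · simp [hcv]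

-- building a dict by inserting f s for each s: lookup is f k when k occurs, default otherwise
lemma getD_foldl_insert_fun (sel : List String) (f : String → Int) (d : PySem.Dict String Int)
    (k : String) :
    (sel.foldl (fun d s => d.insert s (f s)) d).getD k 0 =
      if k ∈ sel then f k else d.getD k 0 := by
  induction sel generalizing d with
  | nil => simp
  | cons s t ih =>
      simp only [List.foldl_cons, ih, PySem.Dict.getD_insert, List.mem_cons]
      by_cases hk : k ∈ t
      · simp [hk]
      · by_cases hks : k = s <;> simp [hk, hks]

-- the items of such a dict over distinct first occurrences
lemma items_foldl_insert_fun (sel : List String) (f : String → Int) :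
    (sel.foldl (fun d s => d.insert s (f s)) (PySem.Dict.empty : PySem.Dict String Int)).items =
      (PySem.Set.ofList sel).map (fun k => (k, f k)) := by
  have hnd : (sel.foldl (fun d s => d.insert s (f s)) (PySem.Dict.empty : PySem.Dict String Int)).keys.Nodup :=
    PySem.Dict.nodup_keys_foldl_insert sel _ _ (by simp)
  have hkeys : (sel.foldl (fun d s => d.insert s (f s)) (PySem.Dict.empty : PySem.Dict String Int)).keys =
      PySem.Set.ofList sel := by
    rw [PySem.Dict.keys_foldl_insert]
    simp [PySem.Dict.keys_empty, PySem.Set.update, PySem.Set.ofList_eq_foldl]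
  rw [PySem.Dict.items_eq_map_keys _ hnd 0, hkeys]
  apply List.map_congr_left
  intro k hk
  have hmem : k ∈ sel := (PySem.Set.mem_ofList sel k).mp hk
  rw [getD_foldl_insert_fun]
  simp [hmem]

-- A's loop items = projection of occurrence counts onto the distinct selected severities
lemma coreA (aIdx sIdx : Nat) (rows : List (List String)) (sel : List String) :
    (rows.foldl (fun d row =>
        if pvAppChars aIdx row ≠ [] then d
        else
          let sev := pvSev sIdx row
          if d.contains sev then d.insert sev (d.getD sev 0 + 1) else d)
      (sel.foldl (fun d s => d.insert s (0 : Int)) PySem.Dict.empty)).items =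
    (PySem.Set.ofList sel).map (fun k =>
      (k, ((((rows.filter (fun row => decide (pvAppChars aIdx row = []))).map
        (pvSev sIdx)).count k : Nat) : Int))) := by
  set d0 : PySem.Dict String Int :=
    sel.foldl (fun d s => d.insert s (0 : Int)) PySem.Dict.empty with hd0
  set L : List String :=
    (rows.filter (fun row => decide (pvAppChars aIdx row = []))).map (pvSev sIdx) with hL
  have hfold := foldA_filter aIdx sIdx rows d0
  rw [← hL] at hfold
  rw [hfold]
  have hnd0 : d0.keys.Nodup := PySem.Dict.nodup_keys_foldl_insert _ _ _ (by simp)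
  obtain ⟨hkeys, hvals⟩ := loopA_spec L d0 hnd0
  have hndA : (L.foldl (fun d sev => if d.contains sev then d.insert sev (d.getD sev 0 + 1) else d) d0).keys.Nodup := by
    rw [hkeys]; exact hnd0
  have hkeys0 : d0.keys = PySem.Set.ofList sel := by
    rw [hd0, PySem.Dict.keys_foldl_insert]
    simp [PySem.Dict.keys_empty, PySem.Set.update, PySem.Set.ofList_eq_foldl]
  rw [PySem.Dict.items_eq_map_keys _ hndA 0, hkeys, hkeys0]
  apply List.map_congr_left
  intro k hk
  have hmem : k ∈ sel := (PySem.Set.mem_ofList sel k).mp hk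
  have hcont : d0.contains k = true := by
    rw [PySem.Dict.contains_eq_decide_mem_keys, hkeys0]
    simp [PySem.Set.mem_ofList, hmem]
  have hd0k : d0.getD k 0 = 0 := by
    rw [hd0, getD_foldl_insert_fun sel (fun _ => (0 : Int))]
    simp
  simp [hvals k, hcont, hd0k]

-- in a ≤-sorted tail all ≥ x, x does not survive dropping its own run
lemma not_mem_dropWhile_beq (x : String) (t : List String)
    (hp : t.Pairwise (· ≤ ·)) (hx : ∀ y ∈ t, x ≤ y) :
    x ∉ t.dropWhile (· == x) := by
  induction t with
  | nil => simp
  | cons y r ih =>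
      rw [List.pairwise_cons] at hp
      by_cases hyx : (y == x) = true
      · simp only [List.dropWhile_cons, hyx, if_true]
        exact ih hp.2 (fun z hz => hx z (List.mem_cons_of_mem _ hz))
      · have hyx' : (y == x) = false := by simpa using hyx
        simp only [List.dropWhile_cons, hyx', Bool.false_eq_true, if_false]
        intro hmem
        rcases List.mem_cons.mp hmem with h | h
        · exact hyx (by simp [h])
        · have h1 : x ≤ y := hx y (List.mem_cons_self)
          have h2 : y ≤ x := hp.1 x h
          exact hyx (by simp [le_antisymm h2 h1])

-- run-length tally of a ≤-sorted list: lookup is the occurrence count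
lemma runLenTally_getD (M : List String) (d : PySem.Dict String Int)
    (hp : M.Pairwise (· ≤ ·)) (k : String) :
    (runLenTally M d).getD k 0 =
      if k ∈ M then ((M.count k : Nat) : Int) else d.getD k 0 := by
  induction M, d using runLenTally.induct with
  | case1 d => simp [runLenTally]
  | case2 x t d ih =>
      rw [List.pairwise_cons] at hp
      have hsplit : t.takeWhile (· == x) ++ t.dropWhile (· == x) = t :=
        List.takeWhile_append_dropWhile
      have hrun : ∀ y ∈ t.takeWhile (· == x), y = x := by
        intro y hy
        have := List.mem_takeWhile_imp hy
        simpa using this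
      have hrest_pair : (t.dropWhile (· == x)).Pairwise (· ≤ ·) :=
        hp.2.sublist (List.dropWhile_sublist _)
      have hxnot : x ∉ t.dropWhile (· == x) :=
        not_mem_dropWhile_beq x t hp.2 hp.1
      rw [runLenTally, ih hrest_pair]
      by_cases hkrest : k ∈ t.dropWhile (· == x)
      · have hkx : k ≠ x := fun h => hxnot (h ▸ hkrest)
        have hkmem : k ∈ x :: t := by
          refine List.mem_cons_of_mem _ ?_
          rw [← hsplit]; exact List.mem_append_right _ hkrest
        rw [if_pos hkrest, if_pos hkmem]
        have hcnt : (x :: t).count k = (t.dropWhile (· == x)).count k := by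
          rw [List.count_cons, ← hsplit, List.count_append]
          have hrun0 : (t.takeWhile (· == x)).count k = 0 := by
            rw [List.count_eq_zero]
            intro hk
            exact hkx (hrun k hk)
          have hxk : (x == k) = false := by
            simpa using fun h : x = k => hkx h.symm
          simp [hrun0, hxk]
        rw [hcnt]
      · rw [if_neg hkrest, PySem.Dict.getD_insert]
        by_cases hkx : k = x
        · subst hkx
          rw [if_pos rfl, if_pos List.mem_cons_self]
          have hcnt : (k :: t).count k = (t.takeWhile (· == k)).length + 1 := by
            rw [List.count_cons, ← hsplit, List.count_append]
            have h1 : (t.takeWhile (· == k)).count k = (t.takeWhile (· == k)).length :=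
              List.count_eq_length.mpr (by intro y hy; simp [hrun y hy])
            have h2 : (t.dropWhile (· == k)).count k = 0 :=
              List.count_eq_zero.mpr hxnot
            simp [h1, h2]
          rw [hcnt]
        · rw [if_neg (by simpa using fun h : (k == x) = true => hkx (by simpa using h))]
          have hknot : k ∉ x :: t := by
            intro hk
            rcases List.mem_cons.mp hk with h | h
            · exact hkx h
            · rw [← hsplit] at h
              rcases List.mem_append.mp h with h | h
              · exact hkx (hrun k h)
              · exact hkrest h
          rw [if_neg hknot]

-- B's tally lookup = occurrence count in the unsorted list (sorting permutes, counts agree)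
lemma coreB_getD (L : List String) (k : String) :
    ((runLenTally (PySem.List.sorted L (fun x => x) false) PySem.Dict.empty).getD k 0) =
      ((L.count k : Nat) : Int) := by
  have hperm : (PySem.List.sorted L (fun x => x) false).Perm L := PySem.List.sorted_perm L _ _
  have hp : (PySem.List.sorted L (fun x => x) false).Pairwise (· ≤ ·) := by
    have := PySem.List.sorted_pairwise L (fun x => x)
    simpa using this
  rw [runLenTally_getD _ _ hp k]
  by_cases hk : k ∈ PySem.List.sorted L (fun x => x) false
  · rw [if_pos hk, hperm.count_eq]
  · rw [if_neg hk]
    have : L.count k = 0 := by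
      rw [← hperm.count_eq, List.count_eq_zero]
      exact hk
    simp [this]

-- B's projection fold rendered as the same map of plain occurrence counts
lemma coreB_items (L sel : List String) :
    (sel.foldl (fun d s =>
        d.insert s ((runLenTally (PySem.List.sorted L (fun x => x) false) PySem.Dict.empty).getD s 0))
      PySem.Dict.empty).items =
    (PySem.Set.ofList sel).map (fun k => (k, ((L.count k : Nat) : Int))) := by
  rw [items_foldl_insert_fun sel
    (fun s => (runLenTally (PySem.List.sorted L (fun x => x) false) PySem.Dict.empty).getD s 0)]
  apply List.map_congr_left
  intro k _
  rw [coreB_getD L k]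

theorem count_unresolved_by_severity_spec_aux (sheet_values : List (List String)) (applicable_column : String) (severity_column : String) (selected_severities : List String)
    (hpre : Pre_count_unresolved_by_severity sheet_values applicable_column severity_column selected_severities) :
    count_unresolved_by_severity sheet_values applicable_column severity_column selected_severities =
    count_unresolved_by_severity_alt sheet_values applicable_column severity_column selected_severities := by
  match sheet_values with
  | [] => rfl
  | header :: rows =>
    rcases hpre with h | ⟨ha, hs⟩
    · exact absurd h (by simp)
    · simp only [List.headD_cons] at ha hs
      have haS : (findColIdx header (PySem.Chars.lower (PySem.Chars.strip applicable_column.toList)) 0).isSome = true := by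
        rw [findColIdx_isSome]; simpa using ha
      have hsS : (findColIdx header (PySem.Chars.lower (PySem.Chars.strip severity_column.toList)) 0).isSome = true := by
        rw [findColIdx_isSome]; simpa using hs
      obtain ⟨aIdx, haI⟩ := Option.isSome_iff_exists.mp haS
      obtain ⟨sIdx, hsI⟩ := Option.isSome_iff_exists.mp hsS
      unfold count_unresolved_by_severity count_unresolved_by_severity_alt
      simp only [findColIdxB_eq, pvAppCharsB_eq, pvSevB_eq, haI, hsI,
        List.isEmpty_cons, List.headD_cons, List.tail_cons, if_false, Bool.false_eq_true]
      rw [coreA aIdx sIdx rows selected_severities, coreB_items]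
      rfl

-- ===== VERDICT (by name: the statement is the Claim_ definition above) =====
theorem count_unresolved_by_severity_spec : Claim_equal_count_unresolved_by_severity := by
  intro sheet_values applicable_column severity_column selected_severities _ hpre
  exact count_unresolved_by_severity_spec_aux sheet_values applicable_column severity_column selected_severities hpre
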